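-- pv_equiv track=rewrite | github.com/RebekahPerkins/FHB | pos_processor.py | pos_map_to_hist
-- ===== SOURCE A (Python) =====
-- def pos_map_to_hist(pos_map):
-- 	hists = dict()
-- 	for word, pos in pos_map:
-- 		if pos != 'NNP':
-- 			word = word.lower()
-- 		pos_hist = hists.get(pos, dict())
-- 		pos_hist[word] = pos_hist.get(word, 0) + 1
-- 		hists[pos] = pos_hist
-- 	return hists
-- ===== SOURCE B (Python) =====
-- def pos_map_to_hist(pos_map):
-- 	# Phase 1: group the normalized words into a flat list per POS tag.
-- 	groups = {}
-- 	for word, pos in pos_map: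
-- 		groups.setdefault(pos, []).append(word if pos == 'NNP' else word.lower())
-- 	# Phase 2: turn each word list into a frequency histogram.
-- 	result = {}
-- 	for pos, words in groups.items():
-- 		hist = {}
-- 		for w in words:
-- 			hist[w] = hist.get(w, 0) + 1
-- 		result[pos] = hist
-- 	return result
-- ===== Notes on version B (the rewrite author's own statement) =====
-- stated objective: alternative
-- what changed: B splits the work into two passes with a different intermediate data structure: it first groups the normalized words into a flat list per POS tag (setdefault/append), then turns each word list into a histogram, instead of A's single loop that grows nested per-POS dicts incrementally.
import Mathlib
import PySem

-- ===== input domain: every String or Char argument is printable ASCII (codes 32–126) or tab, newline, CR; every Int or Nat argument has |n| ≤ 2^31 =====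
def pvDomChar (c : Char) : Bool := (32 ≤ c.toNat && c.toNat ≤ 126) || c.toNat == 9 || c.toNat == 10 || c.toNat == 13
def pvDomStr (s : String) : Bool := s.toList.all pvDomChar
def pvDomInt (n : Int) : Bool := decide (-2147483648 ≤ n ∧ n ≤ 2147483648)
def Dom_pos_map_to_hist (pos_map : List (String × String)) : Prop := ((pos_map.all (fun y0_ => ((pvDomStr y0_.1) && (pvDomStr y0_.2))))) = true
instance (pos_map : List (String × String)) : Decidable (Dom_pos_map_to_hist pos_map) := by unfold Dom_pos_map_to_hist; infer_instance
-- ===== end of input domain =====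

-- B groups the normalized words into per-POS lists in one pass and only then counts each
-- group into a histogram, instead of A's interleaved growth of nested dicts; objective: alternative.


-- ===== PORT A =====
-- literal transliteration of A: one loop growing a dict of per-POS dicts;
-- the returned dict-of-dicts is rendered as nested association lists.
def pos_map_to_hist (pos_map : List (String × String)) : List (String × List (String × Int)) :=
  let hists : PySem.Dict String (PySem.Dict String Int) :=
    pos_map.foldl (fun hists wp =>
      let word := if wp.2 ≠ "NNP" then PySem.Str.lower wp.1 else wp.1
      let pos_hist := hists.getD wp.2 PySem.Dict.empty
      let pos_hist := pos_hist.insert word (pos_hist.getD word 0 + 1)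
      hists.insert wp.2 pos_hist) PySem.Dict.empty
  hists.items.map (fun p => (p.1, p.2.items))

-- ===== PORT B =====
-- literal transliteration of B: phase 1 groups normalized words into lists
-- (setdefault(pos, []).append(w) is exactly Dict.modify pos [] (· ++ [w])),
-- phase 2 counts each group into a histogram.
def pos_map_to_hist_alt (pos_map : List (String × String)) : List (String × List (String × Int)) :=
  let groups : PySem.Dict String (List String) :=
    pos_map.foldl (fun g wp =>
      g.modify wp.2 [] (fun ws => ws ++ [if wp.2 == "NNP" then wp.1 else PySem.Str.lower wp.1]))
      PySem.Dict.empty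
  let result : PySem.Dict String (PySem.Dict String Int) :=
    groups.items.foldl (fun r pw =>
      let hist := pw.2.foldl (fun h w => h.insert w (h.getD w 0 + 1)) PySem.Dict.empty
      r.insert pw.1 hist) PySem.Dict.empty
  result.items.map (fun p => (p.1, p.2.items))

-- ===== PRECONDITION & SPEC =====
def Spec_pos_map_to_hist (pos_map : List (String × String)) (out : List (String × List (String × Int))) : Prop := out = pos_map_to_hist_alt pos_map
instance (pos_map : List (String × String)) (out : List (String × List (String × Int))) : Decidable (Spec_pos_map_to_hist pos_map out) := by unfold Spec_pos_map_to_hist; infer_instance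

-- ===== CLAIM (what is proved, stated in full; the proofs are below) =====
def Claim_equal_pos_map_to_hist : Prop := ∀ (pos_map : List (String × String)), Dom_pos_map_to_hist pos_map → Spec_pos_map_to_hist pos_map (pos_map_to_hist pos_map)

-- ===== LEMMAS AND PROOFS =====

-- the normalized word of one (word, pos) pair
def pvNorm (wp : String × String) : String :=
  if wp.2 == "NNP" then wp.1 else PySem.Str.lower wp.1

-- the word-frequency histogram of a word list, as both inner loops build it
def pvHist (ws : List String) : PySem.Dict String Int :=
  ws.foldl (fun h w => h.insert w (h.getD w 0 + 1)) PySem.Dict.empty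

-- common normal form of both programs: distinct POS tags in first-occurrence order,
-- each paired with the histogram of its normalized words
def pvCanon (l : List (String × String)) : List (String × List (String × Int)) :=
  (PySem.List.dedup (l.map (·.2))).map (fun p =>
    (p, (pvHist ((l.filter (fun wp => wp.2 == p)).map pvNorm)).items))

-- getD through a keyed modify-fold whose new value depends only on the element and the
-- old value at its key: only the elements keyed at p matter (specific shape of our loops)
theorem pvGetD_foldl_modify_key {κ ν β : Type} [BEq κ] [LawfulBEq κ]
    (l : List β) (key : β → κ) (d0 : ν) (f : β → ν → ν) (d : PySem.Dict κ ν) (p : κ) :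
    (l.foldl (fun d x => d.modify (key x) d0 (f x)) d).getD p d0
      = (l.filter (fun x => key x == p)).foldl (fun v x => f x v) (d.getD p d0) := by
  induction l generalizing d with
  | nil => rfl
  | cons x t ih =>
    simp only [List.foldl_cons, List.filter_cons]
    by_cases h : key x = p
    · subst h
      simp only [BEq.rfl, if_pos, List.foldl_cons, ih]
      congr 1
      simp [PySem.Dict.modify, PySem.Dict.getD_insert_self]
    · rw [ih]
      have hb : (key x == p) = false := by simp [h]
      simp only [hb, Bool.false_eq_true, if_false]
      congr 1
      simp [PySem.Dict.modify, PySem.Dict.getD_insert_of_ne _ _ _ (fun he => h he.symm)]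

-- a keyed insert-fold over pairwise-distinct fresh keys just appends its items
theorem pvItems_foldl_insert_fresh {κ ν β : Type} [BEq κ] [LawfulBEq κ]
    (l : List β) (key : β → κ) (f : β → ν) (d : PySem.Dict κ ν)
    (hfresh : ∀ x ∈ l, d.contains (key x) = false) (hnd : (l.map key).Nodup) :
    (l.foldl (fun r x => r.insert (key x) (f x)) d).items
      = d.items ++ l.map (fun x => (key x, f x)) := by
  induction l generalizing d with
  | nil => simp
  | cons x t ih =>
    simp only [List.foldl_cons, List.map_cons]
    obtain ⟨hx_notin, hnd_t⟩ : (∀ y ∈ t, ¬ key y = key x) ∧ (t.map key).Nodup := by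
      simpa using hnd
    have hx : d.contains (key x) = false := hfresh x (List.mem_cons_self ..)
    have hins : (d.insert (key x) (f x)).items = d.items ++ [(key x, f x)] := by
      simp [PySem.Dict.insert, hx]
    rw [ih (d.insert (key x) (f x)) ?_ hnd_t]
    · simp [hins]
    · intro y hy
      have hne : (key x == key y) = false := by
        simp only [beq_eq_false_iff_ne, ne_eq]
        intro he
        exact hx_notin y hy he.symm
      have hd : d.items.any (fun p => p.1 == key y) = false := by
        simpa [PySem.Dict.contains] using hfresh y (List.mem_cons_of_mem _ hy)
      simp [PySem.Dict.contains, hins, hd, hne]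

-- A's loop body is a Dict.modify keyed at wp.2 (definitional)
theorem pvA_step_eq (hists : PySem.Dict String (PySem.Dict String Int)) (wp : String × String) :
    (let word := if wp.2 ≠ "NNP" then PySem.Str.lower wp.1 else wp.1
     let pos_hist := hists.getD wp.2 PySem.Dict.empty
     let pos_hist := pos_hist.insert word (pos_hist.getD word 0 + 1)
     hists.insert wp.2 pos_hist)
    = hists.modify wp.2 PySem.Dict.empty
        (fun ph => ph.insert (pvNorm wp) (ph.getD (pvNorm wp) 0 + 1)) := by
  have hw : (if wp.2 ≠ "NNP" then PySem.Str.lower wp.1 else wp.1) = pvNorm wp := by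
    by_cases h : wp.2 = "NNP" <;> simp [pvNorm, h]
  simp [PySem.Dict.modify, hw]

-- keys of either first-phase fold: the distinct POS tags, in first-occurrence order
theorem pvKeys_phase1 {ν : Type} (l : List (String × String)) (d0 : ν)
    (f : (String × String) → ν → ν) :
    ((l.foldl (fun d wp => d.modify wp.2 d0 (f wp))
        (PySem.Dict.empty : PySem.Dict String ν)).keys)
      = PySem.List.dedup (l.map (·.2)) := by
  have := PySem.Dict.keys_foldl_modify_key (ν := ν) l (fun wp => wp.2) d0
    (fun _ wp v => f wp v) PySem.Dict.empty
  simpa [PySem.List.dedup, PySem.Set.ofList] using this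

theorem pvNodup_phase1 {ν : Type} (l : List (String × String)) (d0 : ν)
    (f : (String × String) → ν → ν) :
    ((l.foldl (fun d wp => d.modify wp.2 d0 (f wp))
        (PySem.Dict.empty : PySem.Dict String ν)).keys).Nodup := by
  apply PySem.Dict.nodup_keys_foldl_modify_key l (fun wp => wp.2) d0 (fun _ wp v => f wp v)
  simp [PySem.Dict.keys, PySem.Dict.empty]

theorem pvA_eq_canon (l : List (String × String)) : pos_map_to_hist l = pvCanon l := by
  show ((l.foldl (fun hists wp =>
      hists.insert wp.2 ((hists.getD wp.2 PySem.Dict.empty).insert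
        (if wp.2 ≠ "NNP" then PySem.Str.lower wp.1 else wp.1)
        ((hists.getD wp.2 PySem.Dict.empty).getD
          (if wp.2 ≠ "NNP" then PySem.Str.lower wp.1 else wp.1) 0 + 1)))
      (PySem.Dict.empty : PySem.Dict String (PySem.Dict String Int))).items.map
        (fun p => (p.1, p.2.items))) = pvCanon l
  have hstep : (fun (hists : PySem.Dict String (PySem.Dict String Int)) (wp : String × String) =>
      hists.insert wp.2 ((hists.getD wp.2 PySem.Dict.empty).insert
        (if wp.2 ≠ "NNP" then PySem.Str.lower wp.1 else wp.1)
        ((hists.getD wp.2 PySem.Dict.empty).getD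
          (if wp.2 ≠ "NNP" then PySem.Str.lower wp.1 else wp.1) 0 + 1)))
      = (fun hists wp => hists.modify wp.2 PySem.Dict.empty
          (fun ph => ph.insert (pvNorm wp) (ph.getD (pvNorm wp) 0 + 1))) := by
    funext hists wp; exact pvA_step_eq hists wp
  rw [hstep]
  set F := l.foldl (fun hists wp => hists.modify wp.2 PySem.Dict.empty
      (fun ph => ph.insert (pvNorm wp) (ph.getD (pvNorm wp) 0 + 1)))
      (PySem.Dict.empty : PySem.Dict String (PySem.Dict String Int)) with hF
  have hkeys : F.keys = PySem.List.dedup (l.map (·.2)) :=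
    pvKeys_phase1 l PySem.Dict.empty
      (fun wp ph => ph.insert (pvNorm wp) (ph.getD (pvNorm wp) 0 + 1))
  have hnd : F.keys.Nodup :=
    pvNodup_phase1 l PySem.Dict.empty
      (fun wp ph => ph.insert (pvNorm wp) (ph.getD (pvNorm wp) 0 + 1))
  have hgetD : ∀ p, F.getD p PySem.Dict.empty
      = pvHist ((l.filter (fun wp => wp.2 == p)).map pvNorm) := by
    intro p
    rw [hF, pvGetD_foldl_modify_key l (fun wp => wp.2) PySem.Dict.empty
      (fun wp ph => ph.insert (pvNorm wp) (ph.getD (pvNorm wp) 0 + 1)) PySem.Dict.empty p]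
    simp only [pvHist, List.foldl_map]
    rfl
  rw [PySem.Dict.items_eq_map_keys F hnd PySem.Dict.empty, hkeys]
  unfold pvCanon
  simp only [List.map_map]
  refine List.map_congr_left (fun p _ => ?_)
  simp [hgetD p]

theorem pvB_eq_canon (l : List (String × String)) : pos_map_to_hist_alt l = pvCanon l := by
  show (((l.foldl (fun g wp =>
      g.modify wp.2 [] (fun ws => ws ++ [if wp.2 == "NNP" then wp.1 else PySem.Str.lower wp.1]))
      (PySem.Dict.empty : PySem.Dict String (List String))).items.foldl (fun r pw =>
        r.insert pw.1 (pw.2.foldl (fun h w => h.insert w (h.getD w 0 + 1)) PySem.Dict.empty))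
      (PySem.Dict.empty : PySem.Dict String (PySem.Dict String Int))).items.map
        (fun p => (p.1, p.2.items))) = pvCanon l
  have hstep : (fun (g : PySem.Dict String (List String)) (wp : String × String) =>
      g.modify wp.2 [] (fun ws => ws ++ [if wp.2 == "NNP" then wp.1 else PySem.Str.lower wp.1]))
      = (fun g wp => g.modify wp.2 [] (fun ws => ws ++ [pvNorm wp])) := rfl
  rw [hstep]
  set G := l.foldl (fun g wp => g.modify wp.2 [] (fun ws => ws ++ [pvNorm wp]))
      (PySem.Dict.empty : PySem.Dict String (List String)) with hG
  have hkeys : G.keys = PySem.List.dedup (l.map (·.2)) :=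
    pvKeys_phase1 l [] (fun wp ws => ws ++ [pvNorm wp])
  have hnd : G.keys.Nodup := pvNodup_phase1 l [] (fun wp ws => ws ++ [pvNorm wp])
  have hgetD : ∀ p, G.getD p [] = (l.filter (fun wp => wp.2 == p)).map pvNorm := by
    intro p
    rw [hG, pvGetD_foldl_modify_key l (fun wp => wp.2) []
      (fun wp ws => ws ++ [pvNorm wp]) PySem.Dict.empty p]
    simpa using PySem.List.foldl_append_singleton_eq_map pvNorm
      (l.filter (fun wp => wp.2 == p)) []
  have hitems : G.items = (PySem.List.dedup (l.map (·.2))).map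
      (fun p => (p, (l.filter (fun wp => wp.2 == p)).map pvNorm)) := by
    rw [PySem.Dict.items_eq_map_keys G hnd [], hkeys]
    exact List.map_congr_left (fun p _ => by rw [hgetD p])
  have hres : (G.items.foldl (fun r pw =>
      r.insert pw.1 (pw.2.foldl (fun h w => h.insert w (h.getD w 0 + 1)) PySem.Dict.empty))
      (PySem.Dict.empty : PySem.Dict String (PySem.Dict String Int))).items
      = G.items.map (fun pw => (pw.1, pvHist pw.2)) := by
    have := pvItems_foldl_insert_fresh G.items (fun pw => pw.1) (fun pw => pvHist pw.2)
      PySem.Dict.empty (fun x _ => by simp [PySem.Dict.contains, PySem.Dict.empty]) hnd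
    simpa [pvHist] using this
  rw [hres, hitems]
  unfold pvCanon
  simp [List.map_map]

-- ===== VERDICT (by name: the statement is the Claim_ definition above) =====
theorem pos_map_to_hist_spec : Claim_equal_pos_map_to_hist := by
  intro l _
  unfold Spec_pos_map_to_hist
  rw [pvA_eq_canon, pvB_eq_canon]
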